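-- pv_equiv track=rewrite | github.com/Cvaniak/AdventOfCode | 2021/Day17/main.py | foox
-- ===== SOURCE A (Python) =====
-- def foox(x, x1, x2):
--     xx = 0
--     mx = 0
--     steps = []
--     i = 0
--     while x:
--         i += 1
--         xx += x
--         if x:
--             x += 1 if x < 0 else -1
--         if xx >= x1 and xx <= x2:
--             steps.append(i)
--     if not x and xx >= x1 and xx <= x2:
--         for i in range(max(steps), max(steps) + 500):
--             steps.append(i)
--     return steps
-- ===== SOURCE B (Python) =====
-- def foox(x, x1, x2):
--     # Closed-form positions: after k steps (1 <= k <= n = |x|) the probe sits at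
--     # sign(x) * q(k) with q(k) = k*n - k*(k-1)//2, which is nondecreasing in k.
--     # Binary-search the first and last step inside the target instead of simulating.
--     n = abs(x)
--     if x >= 0:
--         a, b = x1, x2
--     else:
--         a, b = -x2, -x1
--
--     def q(k):
--         return k * n - k * (k - 1) // 2
--
--     # smallest k in [1, n+1] with q(k) >= a (n+1 acts as "no such step")
--     lo, hi = 1, n + 1
--     while lo < hi:
--         mid = (lo + hi) // 2
--         if q(mid) >= a:
--             hi = mid
--         else:
--             lo = mid + 1
--     first = lo
--     # smallest k in [1, n+1] with q(k) > b; the step before it is the last one <= b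
--     lo, hi = 1, n + 1
--     while lo < hi:
--         mid = (lo + hi) // 2
--         if q(mid) > b:
--             hi = mid
--         else:
--             lo = mid + 1
--     last = lo - 1
--
--     steps = list(range(first, last + 1))
--     if a <= q(n) <= b:
--         steps.extend(range(n, n + 500))
--     return steps
-- ===== Notes on version B (the rewrite author's own statement) =====
-- stated objective: faster
-- what changed: B replaces A's per-step simulation of the decaying velocity (a loop of |x| iterations) with the closed-form triangular position q(k)=k*|x|-k*(k-1)//2 and two binary searches over [1,|x|+1] for the first and last step inside the target; the sign case is handled by reflecting the target interval.
import Mathlib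
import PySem

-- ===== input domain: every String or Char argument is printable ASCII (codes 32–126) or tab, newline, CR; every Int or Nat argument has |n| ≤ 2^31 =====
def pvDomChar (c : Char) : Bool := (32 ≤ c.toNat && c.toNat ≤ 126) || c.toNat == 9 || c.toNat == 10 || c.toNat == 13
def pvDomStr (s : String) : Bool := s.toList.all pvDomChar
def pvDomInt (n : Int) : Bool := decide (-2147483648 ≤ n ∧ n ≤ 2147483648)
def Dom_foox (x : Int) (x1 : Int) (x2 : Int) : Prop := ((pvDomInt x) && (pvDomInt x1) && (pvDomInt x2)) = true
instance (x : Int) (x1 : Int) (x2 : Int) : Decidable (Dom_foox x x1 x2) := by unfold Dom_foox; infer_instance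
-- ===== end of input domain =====

-- B replaces A's step-by-step velocity simulation (a loop of |x| iterations) by the
-- closed-form triangular position q(k) = k*n - k*(k-1)//2 and two binary searches
-- for the first and last in-target step (objective: faster).

-- ===== PORT A =====
-- A's while loop; state (x, xx, i, steps); returns (final x, final xx, steps)
def fooxLoop (x1 x2 : Int) (x xx i : Int) (steps : List Int) : Int × Int × List Int :=
  if _hx : x = 0 then (x, xx, steps)
  else
    fooxLoop x1 x2
      (if x = 0 then x else x + (if x < 0 then 1 else -1))  -- 'if x:' then decay toward 0
      (xx + x) (i + 1)
      (if x1 ≤ xx + x ∧ xx + x ≤ x2 then steps ++ [i + 1] else steps)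
termination_by x.natAbs
decreasing_by
  split_ifs <;> omega

def foox (x : Int) (x1 : Int) (x2 : Int) : List Int :=
  match fooxLoop x1 x2 x 0 0 [] with
  | (xf, xx, steps) =>
    if xf = 0 ∧ x1 ≤ xx ∧ xx ≤ x2 then
      match PySem.List.max? steps (fun y => y) with
      | some m => steps ++ PySem.List.pyRange m (m + 500) 1
      | none => steps   -- Python: max([]) raises ValueError here; excluded by Pre_foox
    else steps

-- ===== PORT B =====
-- closed-form position after k steps (0 ≤ k ≤ n): q(k) = k*n - k*(k-1)//2
def qAlt (n k : Int) : Int := k * n - PySem.Int.floordiv (k * (k - 1)) 2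

-- the 'while lo < hi' binary-search loop of Source B, with its test as parameter p
def bsearchLoop (p : Int → Bool) (lo hi : Int) : Int :=
  if h : lo < hi then
    let mid := PySem.Int.floordiv (lo + hi) 2
    if p mid then bsearchLoop p lo mid else bsearchLoop p (mid + 1) hi
  else lo
termination_by (hi - lo).toNat
decreasing_by
  · have h2 : PySem.Int.floordiv (lo + hi) 2 < hi :=
      (PySem.Int.floordiv_lt_iff_lt_mul (by omega)).2 (by omega)
    simp only [mid] at *; omega
  · have h1 := (PySem.Int.floordiv_two_mid_bounds (le_of_lt h)).1
    simp only [mid] at *; omega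

def foox_alt (x : Int) (x1 : Int) (x2 : Int) : List Int :=
  let n := |x|
  let a := if 0 ≤ x then x1 else -x2
  let b := if 0 ≤ x then x2 else -x1
  let first := bsearchLoop (fun mid => decide (a ≤ qAlt n mid)) 1 (n + 1)
  let last := bsearchLoop (fun mid => decide (b < qAlt n mid)) 1 (n + 1) - 1
  let steps := PySem.List.pyRange first (last + 1) 1
  if a ≤ qAlt n n ∧ qAlt n n ≤ b then steps ++ PySem.List.pyRange n (n + 500) 1
  else steps

-- ===== PRECONDITION & SPEC =====
-- Pre_ excludes exactly the inputs where A raises ValueError (max() of an empty list):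
-- x = 0 with 0 inside [x1, x2].
def Pre_foox (x : Int) (x1 : Int) (x2 : Int) : Prop := ¬(x = 0 ∧ x1 ≤ 0 ∧ 0 ≤ x2)
instance (x : Int) (x1 : Int) (x2 : Int) : Decidable (Pre_foox x x1 x2) := by
  unfold Pre_foox; infer_instance

def pvWitness_foox : Int × Int × Int := (3, 3, 6)

def Spec_foox (x : Int) (x1 : Int) (x2 : Int) (out : List Int) : Prop := out = foox_alt x x1 x2
instance (x : Int) (x1 : Int) (x2 : Int) (out : List Int) : Decidable (Spec_foox x x1 x2 out) := by
  unfold Spec_foox; infer_instance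

-- ===== CLAIM (what is proved, stated in full; the proofs are below) =====
def Claim_equal_foox : Prop := ∀ (x : Int) (x1 : Int) (x2 : Int), Dom_foox x x1 x2 → Pre_foox x x1 x2 → Spec_foox x x1 x2 (foox x x1 x2)


-- ===== LEMMAS AND PROOFS =====

lemma qAlt_zero (n : Int) : qAlt n 0 = 0 := by simp [qAlt]

lemma qAlt_one (m : Int) : qAlt m 1 = m := by simp [qAlt]

lemma qAlt_succ (m k : Int) : qAlt (m + 1) (k + 1) = (m + 1) + qAlt m k := by
  unfold qAlt
  rw [PySem.Int.floordiv_eq_ediv_of_pos (a := k * (k-1)) (by norm_num),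
      PySem.Int.floordiv_eq_ediv_of_pos (a := (k+1) * (k+1-1)) (by norm_num)]
  have h : (k + 1) * (k + 1 - 1) = k * (k - 1) + k * 2 := by ring
  rw [h, Int.add_mul_ediv_right _ _ (by norm_num : (2:Int) ≠ 0)]
  ring

lemma qAlt_step (n k : Int) : qAlt n (k + 1) = qAlt n k + (n - k) := by
  unfold qAlt
  rw [PySem.Int.floordiv_eq_ediv_of_pos (a := k * (k-1)) (by norm_num),
      PySem.Int.floordiv_eq_ediv_of_pos (a := (k+1) * (k+1-1)) (by norm_num)]
  have h : (k + 1) * (k + 1 - 1) = k * (k - 1) + k * 2 := by ring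
  rw [h, Int.add_mul_ediv_right _ _ (by norm_num : (2:Int) ≠ 0)]
  ring

lemma qAlt_mono (n j k : Int) (_h0 : 0 ≤ j) (hjk : j ≤ k) (hk : k ≤ n) :
    qAlt n j ≤ qAlt n k := by
  induction k, hjk using Int.le_induction with
  | base => exact le_refl _
  | succ m hm ih =>
      have := qAlt_step n m
      have h2 := ih (by omega)
      omega

lemma bsearch_spec_aux (n : Nat) : ∀ (p : Int → Bool) (lo hi : Int), (hi - lo).toNat = n → lo ≤ hi →
    (∀ j k, lo ≤ j → j ≤ k → k < hi → p j = true → p k = true) →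
    lo ≤ bsearchLoop p lo hi ∧ bsearchLoop p lo hi ≤ hi ∧
    (∀ k, lo ≤ k → k < bsearchLoop p lo hi → p k = false) ∧
    (∀ k, bsearchLoop p lo hi ≤ k → k < hi → p k = true) := by
  induction n using Nat.strong_induction_on with
  | _ n ih =>
    intro p lo hi hn hle hmono
    rw [bsearchLoop]
    by_cases h : lo < hi
    · have hm1 := (PySem.Int.floordiv_two_mid_bounds (le_of_lt h)).1
      have hm2 : PySem.Int.floordiv (lo + hi) 2 < hi :=
        (PySem.Int.floordiv_lt_iff_lt_mul (by omega)).2 (by omega)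
      set mid := PySem.Int.floordiv (lo + hi) 2 with hmid
      by_cases hp : p mid = true
      · simp only [dif_pos h, if_pos hp]
        obtain ⟨i1, i2, i3, i4⟩ := ih (mid - lo).toNat (by omega) p lo mid rfl (by omega)
          (fun j k hj hjk hk hpj => hmono j k hj hjk (by omega) hpj)
        refine ⟨i1, by omega, i3, ?_⟩
        intro k hk1 hk2
        by_cases hkm : k < mid
        · exact i4 k hk1 hkm
        · exact hmono mid k (by omega) (by omega) hk2 hp
      · simp only [dif_pos h, if_neg hp]
        obtain ⟨i1, i2, i3, i4⟩ := ih (hi - (mid + 1)).toNat (by omega) p (mid + 1) hi rfl (by omega)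
          (fun j k hj hjk hk hpj => hmono j k (by omega) hjk hk hpj)
        refine ⟨by omega, i2, ?_, i4⟩
        intro k hk1 hk2
        by_cases hkm : mid + 1 ≤ k
        · exact i3 k hkm hk2
        · cases hpk : p k
          · rfl
          · exact absurd (hmono k mid hk1 (by omega) hm2 hpk) hp
    · simp only [dif_neg h]
      exact ⟨le_refl _, hle, fun k hk1 hk2 => absurd hk2 (by omega), fun k hk1 hk2 => absurd hk2 (by omega)⟩

lemma bsearch_spec (p : Int → Bool) (lo hi : Int) (hle : lo ≤ hi)
    (hmono : ∀ j k, lo ≤ j → j ≤ k → k < hi → p j = true → p k = true) :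
    lo ≤ bsearchLoop p lo hi ∧ bsearchLoop p lo hi ≤ hi ∧
    (∀ k, lo ≤ k → k < bsearchLoop p lo hi → p k = false) ∧
    (∀ k, bsearchLoop p lo hi ≤ k → k < hi → p k = true) :=
  bsearch_spec_aux (hi - lo).toNat p lo hi rfl hle hmono

lemma filter_interval (a b lo hi : Int) (h1 : a ≤ lo) (h2 : hi ≤ b) :
    (PySem.List.pyRange a b 1).filter (fun k => decide (lo ≤ k ∧ k < hi)) =
      PySem.List.pyRange lo hi 1 := by
  by_cases hlh : lo ≤ hi
  · rw [PySem.List.pyRange_one_append a lo b h1 (le_trans hlh h2),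
        PySem.List.pyRange_one_append lo hi b hlh h2,
        List.filter_append, List.filter_append]
    have e1 : (PySem.List.pyRange a lo 1).filter (fun k => decide (lo ≤ k ∧ k < hi)) = [] := by
      rw [List.filter_eq_nil_iff]
      intro k hk
      have := (PySem.List.mem_pyRange_one).1 hk
      simp; omega
    have e3 : (PySem.List.pyRange hi b 1).filter (fun k => decide (lo ≤ k ∧ k < hi)) = [] := by
      rw [List.filter_eq_nil_iff]
      intro k hk
      have := (PySem.List.mem_pyRange_one).1 hk
      simp; omega
    have e2 : (PySem.List.pyRange lo hi 1).filter (fun k => decide (lo ≤ k ∧ k < hi)) =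
        PySem.List.pyRange lo hi 1 := by
      rw [List.filter_eq_self]
      intro k hk
      have := (PySem.List.mem_pyRange_one).1 hk
      simp; omega
    rw [e1, e2, e3, List.nil_append, List.append_nil]
  · rw [PySem.List.pyRange_one_eq_nil (by omega : hi ≤ lo), List.filter_eq_nil_iff]
    intro k hk
    simp; omega

lemma loopA_spec (x1 x2 : Int) (n : Nat) : ∀ (xx i : Int) (steps : List Int),
    fooxLoop x1 x2 (n : Int) xx i steps =
      ((0 : Int), xx + qAlt n n,
       steps ++ ((PySem.List.pyRange 1 ((n : Int) + 1) 1).filter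
          (fun k => decide (x1 ≤ xx + qAlt n k ∧ xx + qAlt n k ≤ x2))).map (fun k => i + k)) := by
  induction n with
  | zero =>
      intro xx i steps
      rw [fooxLoop]
      simp [qAlt_zero]
  | succ n ihn =>
      intro xx i steps
      have hcast : ((n + 1 : Nat) : Int) = (n : Int) + 1 := by push_cast; ring
      rw [fooxLoop]
      rw [dif_neg (by omega : ¬ ((n + 1 : Nat) : Int) = 0)]
      rw [if_neg (by omega : ¬ ((n + 1 : Nat) : Int) = 0)]
      rw [if_neg (by omega : ¬ ((n + 1 : Nat) : Int) < 0)]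
      have harg : ((n + 1 : Nat) : Int) + -1 = (n : Int) := by omega
      rw [harg]
      rw [ihn (xx + ((n+1 : Nat) : Int)) (i + 1)]
      rw [hcast]
      refine Prod.ext rfl (Prod.ext ?_ ?_)
      · show xx + ((n:Int)+1) + qAlt n n = xx + qAlt ((n:Int)+1) ((n:Int)+1)
        have := qAlt_succ (n : Int) (n : Int)
        omega
      · show (if x1 ≤ xx + ((n:Int)+1) ∧ xx + ((n:Int)+1) ≤ x2 then steps ++ [i+1] else steps) ++
          ((PySem.List.pyRange 1 ((n : Int) + 1) 1).filter
            (fun k => decide (x1 ≤ xx + ((n:Int)+1) + qAlt n k ∧ xx + ((n:Int)+1) + qAlt n k ≤ x2))).map (fun k => (i+1) + k) =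
          steps ++ ((PySem.List.pyRange 1 ((n : Int) + 1 + 1) 1).filter
            (fun k => decide (x1 ≤ xx + qAlt ((n:Int)+1) k ∧ xx + qAlt ((n:Int)+1) k ≤ x2))).map (fun k => i + k)
        have hshift : PySem.List.pyRange (1+1) ((n:Int)+1+1) 1 = (PySem.List.pyRange 1 ((n:Int)+1) 1).map (fun k => k + 1) := by
          rw [PySem.List.pyRange_one, PySem.List.pyRange_one, List.map_map]
          have ht : ((n:Int)+1+1-(1+1)).toNat = ((n:Int)+1-1).toNat := by omega
          rw [ht]
          refine List.map_congr_left (fun a _ => ?_)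
          simp; ring
        have hpred : ((fun k => decide (x1 ≤ xx + qAlt ((n:Int)+1) k ∧ xx + qAlt ((n:Int)+1) k ≤ x2)) ∘ (fun k => k + 1)) =
            (fun k => decide (x1 ≤ xx + ((n:Int)+1) + qAlt n k ∧ xx + ((n:Int)+1) + qAlt n k ≤ x2)) := by
          funext k
          simp only [Function.comp_apply, qAlt_succ, decide_eq_decide]
          omega
        have hq1 : qAlt ((n:Int)+1) 1 = (n:Int)+1 := qAlt_one _
        rw [PySem.List.pyRange_one_cons (by omega : (1:Int) < (n:Int)+1+1), List.filter_cons, hshift,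
            List.filter_map, hpred, hq1]
        by_cases hC : x1 ≤ xx + ((n:Int)+1) ∧ xx + ((n:Int)+1) ≤ x2
        · rw [if_pos hC, if_pos (by simpa using hC)]
          rw [List.map_cons, List.map_map, List.append_assoc, List.singleton_append]
          congr 1
          congr 1
          refine List.map_congr_left (fun a _ => ?_)
          simp; ring
        · rw [if_neg hC, if_neg (by simpa using hC), List.map_map]
          congr 1
          refine List.map_congr_left (fun a _ => ?_)
          simp; ring

lemma loopA_neg (x1 x2 : Int) : ∀ (m : Nat) (x xx i : Int) (steps : List Int), x.natAbs = m →
    fooxLoop x1 x2 x xx i steps =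
      (-(fooxLoop (-x2) (-x1) (-x) (-xx) i steps).1,
       -(fooxLoop (-x2) (-x1) (-x) (-xx) i steps).2.1,
       (fooxLoop (-x2) (-x1) (-x) (-xx) i steps).2.2) := by
  intro m
  induction m with
  | zero =>
      intro x xx i steps hm
      have hx : x = 0 := by omega
      subst hx
      have h0 : fooxLoop (-x2) (-x1) 0 (-xx) i steps = (0, -xx, steps) := by
        rw [fooxLoop]; norm_num
      rw [fooxLoop]
      norm_num [h0]
  | succ m ihm =>
      intro x xx i steps hm
      have hx : ¬ x = 0 := by omega
      have hnx : ¬ (-x) = 0 := by omega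
      rw [fooxLoop, dif_neg hx, if_neg hx]
      conv_rhs => rw [fooxLoop, dif_neg hnx, if_neg hnx]
      have harg : (-x) + (if -x < 0 then 1 else -1) = -(x + (if x < 0 then 1 else -1)) := by
        split_ifs <;> omega
      have hxx : -xx + -x = -(xx + x) := by ring
      have hcond : (-x2 ≤ -(xx + x) ∧ -(xx + x) ≤ -x1) ↔ (x1 ≤ xx + x ∧ xx + x ≤ x2) := by
        constructor <;> (intro h; omega)
      rw [harg, hxx, if_congr hcond rfl rfl]
      exact ihm (x + (if x < 0 then 1 else -1)) (xx + x) (i + 1) _ (by split_ifs <;> omega)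

lemma foldl_max_pyRange (n : Nat) : ∀ (a init : Int),
    (PySem.List.pyRange a (a + n) 1).foldl max init =
      if 0 < n then max init (a + n - 1) else init := by
  induction n with
  | zero =>
      intro a init
      simp
  | succ n ihn =>
      intro a init
      have hn1 : ((n + 1 : Nat) : Int) = (n : Int) + 1 := by push_cast; ring
      have hc : a + ((n:Int) + 1) = (a + n) + 1 := by ring
      rw [hn1, hc, PySem.List.pyRange_one_succ_right (by omega : a ≤ a + (n:Int)),
          List.foldl_append, ihn a init]
      by_cases h : 0 < n
      · rw [if_pos h, if_pos (by omega)]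
        simp only [List.foldl_cons, List.foldl_nil]
        omega
      · have hn0 : n = 0 := by omega
        subst hn0
        norm_num

lemma max?_pyRange (a b : Int) (h : a < b) :
    PySem.List.max? (PySem.List.pyRange a b 1) (fun y => y) = some (b - 1) := by
  rw [PySem.List.pyRange_one_cons h, PySem.List.max?_id_cons]
  have hb : b = (a + 1) + ((b - a - 1).toNat : Int) := by omega
  rw [hb, foldl_max_pyRange]
  by_cases h2 : a + 1 < b
  · rw [if_pos (by omega)]
    congr 1
    omega
  · rw [if_neg (by omega)]
    congr 1
    omega

lemma main_pos (x1 x2 : Int) (n : Nat) (hpre : Pre_foox (n : Int) x1 x2) :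
    foox (n : Int) x1 x2 = foox_alt (n : Int) x1 x2 := by
  have hmono1 : ∀ j k : Int, 1 ≤ j → j ≤ k → k < (n:Int)+1 →
      (fun mid => decide (x1 ≤ qAlt n mid)) j = true → (fun mid => decide (x1 ≤ qAlt n mid)) k = true := by
    intro j k hj hjk hk hd
    simp only [decide_eq_true_eq] at *
    exact le_trans hd (qAlt_mono n j k (by omega) hjk (by omega))
  have hmono2 : ∀ j k : Int, 1 ≤ j → j ≤ k → k < (n:Int)+1 →
      (fun mid => decide (x2 < qAlt n mid)) j = true → (fun mid => decide (x2 < qAlt n mid)) k = true := by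
    intro j k hj hjk hk hd
    simp only [decide_eq_true_eq] at *
    exact lt_of_lt_of_le hd (qAlt_mono n j k (by omega) hjk (by omega))
  obtain ⟨f1, f2, f3, f4⟩ := bsearch_spec _ 1 ((n:Int)+1) (by omega) hmono1
  obtain ⟨g1, g2, g3, g4⟩ := bsearch_spec _ 1 ((n:Int)+1) (by omega) hmono2
  set F := bsearchLoop (fun mid => decide (x1 ≤ qAlt n mid)) 1 ((n:Int)+1) with hF
  set G := bsearchLoop (fun mid => decide (x2 < qAlt n mid)) 1 ((n:Int)+1) with hG
  have hiff : ∀ k : Int, k ∈ PySem.List.pyRange 1 ((n:Int)+1) 1 →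
      (decide (x1 ≤ qAlt n k ∧ qAlt n k ≤ x2) : Bool) = decide (F ≤ k ∧ k < G) := by
    intro k hk
    have hkb := (PySem.List.mem_pyRange_one).1 hk
    rw [decide_eq_decide]
    constructor
    · intro ⟨hp1, hp2⟩
      constructor
      · by_contra hc
        have := f3 k (by omega) (by omega)
        simp only [decide_eq_false_iff_not] at this
        exact this hp1
      · by_contra hc
        have := g4 k (by omega) (by omega)
        simp only [decide_eq_true_eq] at this
        omega
    · intro ⟨hp1, hp2⟩
      constructor
      · have := f4 k hp1 (by omega)
        simpa using this
      · have := g3 k (by omega) hp2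
        simp only [decide_eq_false_iff_not] at this
        omega
  have hfilter : (PySem.List.pyRange 1 ((n:Int)+1) 1).filter
      (fun k => decide (x1 ≤ qAlt n k ∧ qAlt n k ≤ x2)) = PySem.List.pyRange F G 1 := by
    rw [List.filter_congr hiff]
    exact filter_interval 1 ((n:Int)+1) F G f1 g2
  -- unfold A
  unfold foox
  rw [loopA_spec x1 x2 n 0 0 []]
  -- unfold B
  unfold foox_alt
  simp only [Int.abs_natCast, if_pos (by positivity : (0:Int) ≤ (n:Int)), List.nil_append, zero_add, ← hF, ← hG]
  have hG1 : G - 1 + 1 = G := by ring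
  rw [hG1, hfilter]
  simp only [List.map_id', true_and]
  by_cases hT : x1 ≤ qAlt n n ∧ qAlt n n ≤ x2
  · rw [if_pos hT, if_pos hT]
    have hn1 : 1 ≤ (n:Int) := by
      rcases Nat.eq_zero_or_pos n with h0 | h1
      · exfalso
        subst h0
        have hq := qAlt_zero 0
        simp only [Nat.cast_zero] at hT
        exact hpre ⟨rfl, by omega, by omega⟩
      · exact_mod_cast h1
    have hGn : G = (n:Int) + 1 := by
      by_contra hc
      have := g4 (n:Int) (by omega) (by omega)
      simp only [decide_eq_true_eq] at this
      omega
    have hFn : F ≤ (n:Int) := by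
      by_contra hc
      have := f3 (n:Int) (by omega) (by omega)
      simp only [decide_eq_false_iff_not] at this
      exact this hT.1
    rw [hGn, max?_pyRange F ((n:Int)+1) (by omega)]
    dsimp only
    have he : (n:Int) + 1 - 1 = (n:Int) := by ring
    rw [he]
  · rw [if_neg hT, if_neg hT]

lemma foox_reflect (x x1 x2 : Int) : foox x x1 x2 = foox (-x) (-x2) (-x1) := by
  unfold foox
  rw [loopA_neg x1 x2 x.natAbs x 0 0 [] rfl, neg_zero]
  rcases hE : fooxLoop (-x2) (-x1) (-x) 0 0 [] with ⟨r1, r2, r3⟩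
  dsimp only
  rw [if_congr (by constructor <;> (intro h; constructor <;> omega) :
    (-r1 = 0 ∧ x1 ≤ -r2 ∧ -r2 ≤ x2) ↔ (r1 = 0 ∧ -x2 ≤ r2 ∧ r2 ≤ -x1)) rfl rfl]

lemma foox_alt_reflect (x x1 x2 : Int) (hx : x < 0) :
    foox_alt x x1 x2 = foox_alt (-x) (-x2) (-x1) := by
  unfold foox_alt
  rw [abs_of_neg hx, abs_of_nonneg (by omega : (0:Int) ≤ -x),
      if_neg (by omega : ¬ (0:Int) ≤ x), if_neg (by omega : ¬ (0:Int) ≤ x),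
      if_pos (by omega : (0:Int) ≤ -x), if_pos (by omega : (0:Int) ≤ -x)]

-- ===== VERDICT (by name: the statement is the Claim_ definition above) =====
theorem foox_spec : Claim_equal_foox := by
  intro x x1 x2 _ hpre
  unfold Spec_foox
  by_cases hx : 0 ≤ x
  · obtain ⟨n, rfl⟩ := Int.eq_ofNat_of_zero_le hx
    exact (main_pos x1 x2 n hpre).symm ▸ rfl
  · have hx' : x < 0 := by omega
    rw [foox_reflect, foox_alt_reflect x x1 x2 hx']
    obtain ⟨n, hn⟩ := Int.eq_ofNat_of_zero_le (by omega : (0:Int) ≤ -x)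
    rw [hn]
    exact main_pos (-x2) (-x1) n (by unfold Pre_foox; omega)
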